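-- pv_equiv track=rewrite | github.com/Chocobear69/Elk-Academy-Telegram-Bot | elk_daily_report.py | divide_good_and_bad
-- ===== SOURCE A (Python) =====
-- def divide_good_and_bad(messages):
--     messages_to_send = dict()
--     for message in messages:
--         if message[0] not in messages_to_send:
--             messages_to_send[message[0]] = {
--                 'good_boys': [],
--                 'bad_boys': [],
--             }
--         if message[2]:
--             messages_to_send[message[0]]['good_boys'].append(message[1])
--         else:
--             messages_to_send[message[0]]['bad_boys'].append(message[1])
--     return messages_to_send
-- ===== SOURCE B (Python) =====
-- def divide_good_and_bad(messages):
--     good = {}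
--     bad = {}
--     for key, text, is_good in messages:
--         target = good if is_good else bad
--         target.setdefault(key, []).append(text)
--     return {k: {'good_boys': good.get(k, []), 'bad_boys': bad.get(k, [])}
--             for k in dict.fromkeys(m[0] for m in messages)}
-- ===== Notes on version B (the rewrite author's own statement) =====
-- stated objective: alternative
-- what changed: Instead of one nested dict mutated in place, B keeps two flat key->list tables filled in one pass, captures first-encounter key order with dict.fromkeys, and assembles the nested result in a separate comprehension pass.
import Mathlib
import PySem

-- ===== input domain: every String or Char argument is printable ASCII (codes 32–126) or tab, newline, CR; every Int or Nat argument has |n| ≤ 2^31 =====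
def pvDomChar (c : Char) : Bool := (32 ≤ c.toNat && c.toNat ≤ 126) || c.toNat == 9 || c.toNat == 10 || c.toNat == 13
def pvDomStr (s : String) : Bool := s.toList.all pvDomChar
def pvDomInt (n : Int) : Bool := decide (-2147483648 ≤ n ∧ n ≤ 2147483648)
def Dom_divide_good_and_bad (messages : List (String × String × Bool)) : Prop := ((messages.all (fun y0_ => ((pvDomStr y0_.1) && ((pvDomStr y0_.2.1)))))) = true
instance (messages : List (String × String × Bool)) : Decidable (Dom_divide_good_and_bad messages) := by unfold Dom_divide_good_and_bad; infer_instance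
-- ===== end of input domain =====

-- B replaces A's nested dict mutated in place by two flat key->list tables plus a
-- first-encounter key-order pass, assembling the nested result separately (alternative
-- decomposition, same O(n) cost).


-- ===== PORT A =====
-- one loop step of A: ensure the nested entry exists, then append to the chosen inner list
def goodAndBadStepA (d : PySem.Dict String (PySem.Dict String (List String)))
    (m : String × String × Bool) : PySem.Dict String (PySem.Dict String (List String)) :=
  let d1 := if d.contains m.1 then d
            else d.insert m.1 (PySem.Dict.mk [("good_boys", []), ("bad_boys", [])])
  if m.2.2 then
    d1.modify m.1 PySem.Dict.empty (fun inner => inner.modify "good_boys" [] (· ++ [m.2.1]))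
  else
    d1.modify m.1 PySem.Dict.empty (fun inner => inner.modify "bad_boys" [] (· ++ [m.2.1]))

def divide_good_and_bad (messages : List (String × String × Bool)) :
    List (String × List (String × List String)) :=
  ((messages.foldl goodAndBadStepA PySem.Dict.empty).items).map (fun p => (p.1, p.2.items))

-- ===== PORT B =====
-- one loop step of B: append the text to the good or the bad flat table
def goodAndBadStepB
    (gb : PySem.Dict String (List String) × PySem.Dict String (List String))
    (m : String × String × Bool) :
    PySem.Dict String (List String) × PySem.Dict String (List String) :=
  if m.2.2 then (gb.1.modify m.1 [] (· ++ [m.2.1]), gb.2)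
  else (gb.1, gb.2.modify m.1 [] (· ++ [m.2.1]))

def divide_good_and_bad_alt (messages : List (String × String × Bool)) :
    List (String × List (String × List String)) :=
  let gb := messages.foldl goodAndBadStepB (PySem.Dict.empty, PySem.Dict.empty)
  (PySem.List.dedup (messages.map (·.1))).map (fun k =>
    (k, [("good_boys", gb.1.getD k []), ("bad_boys", gb.2.getD k [])]))

-- ===== PRECONDITION & SPEC =====
def Spec_divide_good_and_bad (messages : List (String × String × Bool)) (out : List (String × List (String × List String))) : Prop := out = divide_good_and_bad_alt messages
instance (messages : List (String × String × Bool)) (out : List (String × List (String × List String))) : Decidable (Spec_divide_good_and_bad messages out) := by unfold Spec_divide_good_and_bad; infer_instance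

-- ===== CLAIM (what is proved, stated in full; the proofs are below) =====
def Claim_equal_divide_good_and_bad : Prop := ∀ (messages : List (String × String × Bool)), Dom_divide_good_and_bad messages → Spec_divide_good_and_bad messages (divide_good_and_bad messages)

-- ===== LEMMAS AND PROOFS =====

-- the inner two-entry dict, appended to on the good side
lemma gb_inner_good (G B : List String) (t : String) :
    (PySem.Dict.mk [("good_boys", G), ("bad_boys", B)] : PySem.Dict String (List String)).modify
      "good_boys" [] (· ++ [t])
    = PySem.Dict.mk [("good_boys", G ++ [t]), ("bad_boys", B)] := by
  simp [PySem.Dict.modify, PySem.Dict.insert, PySem.Dict.getD, PySem.Dict.get?,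
    PySem.Dict.contains]

-- the inner two-entry dict, appended to on the bad side
lemma gb_inner_bad (G B : List String) (t : String) :
    (PySem.Dict.mk [("good_boys", G), ("bad_boys", B)] : PySem.Dict String (List String)).modify
      "bad_boys" [] (· ++ [t])
    = PySem.Dict.mk [("good_boys", G), ("bad_boys", B ++ [t])] := by
  simp [PySem.Dict.modify, PySem.Dict.insert, PySem.Dict.getD, PySem.Dict.get?,
    PySem.Dict.contains]

-- the keys of A's dict after one step are Set.add of the previous keys
lemma gb_stepA_keys (d : PySem.Dict String (PySem.Dict String (List String)))
    (m : String × String × Bool) :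
    (goodAndBadStepA d m).keys = PySem.Set.add d.keys m.1 := by
  unfold goodAndBadStepA PySem.Set.add
  by_cases hc : d.contains m.1 = true
  · have hmem : m.1 ∈ d.keys := by
      have := PySem.Dict.contains_eq_decide_mem_keys d m.1
      rw [hc] at this; exact of_decide_eq_true this.symm
    have hk : ∀ f : PySem.Dict String (List String) → PySem.Dict String (List String),
        (d.modify m.1 PySem.Dict.empty f).keys = d.keys := by
      intro f
      rw [PySem.Dict.keys_modify, PySem.Dict.keys_insert_of_contains _ _ hc]
    simp only [hc, if_true]
    split <;> rw [hk] <;> simp [hmem]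
  · have hc' : d.contains m.1 = false := by simpa using hc
    have hnmem : m.1 ∉ d.keys := by
      have := PySem.Dict.contains_eq_decide_mem_keys d m.1
      rw [hc'] at this
      exact of_decide_eq_false this.symm
    have hc1 : (d.insert m.1 (PySem.Dict.mk [("good_boys", []), ("bad_boys", [])])).contains m.1 = true :=
      PySem.Dict.contains_insert_self _ _ _
    have hk : ∀ f : PySem.Dict String (List String) → PySem.Dict String (List String),
        ((d.insert m.1 (PySem.Dict.mk [("good_boys", []), ("bad_boys", [])])).modify
          m.1 PySem.Dict.empty f).keys = d.keys ++ [m.1] := by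
      intro f
      rw [PySem.Dict.keys_modify, PySem.Dict.keys_insert_of_contains _ _ hc1,
        PySem.Dict.keys_insert_of_not_contains _ _ hc']
    simp only [hc', Bool.false_eq_true, if_false]
    split <;> rw [hk] <;> simp [hnmem]

-- one step preserves the contains relation between the two loops' states
lemma gb_stepA_contains (d : PySem.Dict String (PySem.Dict String (List String)))
    (g b : PySem.Dict String (List String)) (m : String × String × Bool)
    (hc : ∀ k, d.contains k = (g.contains k || b.contains k)) (k : String) :
    (goodAndBadStepA d m).contains k
      = ((goodAndBadStepB (g, b) m).1.contains k || (goodAndBadStepB (g, b) m).2.contains k) := by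
  unfold goodAndBadStepA goodAndBadStepB
  by_cases hck : d.contains m.1 = true <;>
    cases m.2.2 <;>
      simp [hck, PySem.Dict.contains_modify, PySem.Dict.contains_insert, hc k] <;>
        cases k == m.1 <;> cases g.contains k <;> cases b.contains k <;> simp_all

-- one step preserves the value relation between the two loops' states
lemma gb_stepA_getD (d : PySem.Dict String (PySem.Dict String (List String)))
    (g b : PySem.Dict String (List String)) (m : String × String × Bool)
    (hc : ∀ k, d.contains k = (g.contains k || b.contains k))
    (hv : ∀ k, d.contains k = true →
      d.getD k PySem.Dict.empty
        = PySem.Dict.mk [("good_boys", g.getD k []), ("bad_boys", b.getD k [])])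
    (k : String) (hk : (goodAndBadStepA d m).contains k = true) :
    (goodAndBadStepA d m).getD k PySem.Dict.empty
      = PySem.Dict.mk [("good_boys", (goodAndBadStepB (g, b) m).1.getD k []),
          ("bad_boys", (goodAndBadStepB (g, b) m).2.getD k [])] := by
  obtain ⟨k0, t, flag⟩ := m
  have hgd : (if d.contains k0 = true then d
      else d.insert k0 (PySem.Dict.mk [("good_boys", []), ("bad_boys", [])])).getD k0 PySem.Dict.empty
      = PySem.Dict.mk [("good_boys", g.getD k0 []), ("bad_boys", b.getD k0 [])] := by
    by_cases hck : d.contains k0 = true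
    · simpa [hck] using hv k0 hck
    · have hck' : d.contains k0 = false := by simpa using hck
      have hg : g.contains k0 = false := by
        have := hc k0; rw [hck'] at this
        exact (Bool.or_eq_false_iff.mp this.symm).1
      have hb : b.contains k0 = false := by
        have := hc k0; rw [hck'] at this
        exact (Bool.or_eq_false_iff.mp this.symm).2
      simp [hck', PySem.Dict.getD_insert_self, PySem.Dict.getD_of_not_contains _ _ hg,
        PySem.Dict.getD_of_not_contains _ _ hb]
  have hdk : ∀ f, k ≠ k0 →
      ((if d.contains k0 = true then d
        else d.insert k0 (PySem.Dict.mk [("good_boys", []), ("bad_boys", [])])).modify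
          k0 PySem.Dict.empty f).contains k = true →
      d.contains k = true ∧
      ((if d.contains k0 = true then d
        else d.insert k0 (PySem.Dict.mk [("good_boys", []), ("bad_boys", [])])).modify
          k0 PySem.Dict.empty f).getD k PySem.Dict.empty = d.getD k PySem.Dict.empty := by
    intro f hkk hcon
    have hbk : (k == k0) = false := beq_eq_false_iff_ne.mpr hkk
    rw [PySem.Dict.contains_modify, hbk, Bool.false_or] at hcon
    rw [PySem.Dict.getD_modify, if_neg hkk]
    by_cases hck : d.contains k0 = true
    · rw [if_pos hck] at hcon ⊢; exact ⟨hcon, rfl⟩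
    · have hck' : d.contains k0 = false := by simpa using hck
      rw [if_neg (by simp [hck'])] at hcon ⊢
      rw [PySem.Dict.contains_insert, hbk, Bool.false_or] at hcon
      rw [PySem.Dict.getD_insert, if_neg hkk]
      exact ⟨hcon, rfl⟩
  cases flag with
  | true =>
    unfold goodAndBadStepA at hk ⊢
    unfold goodAndBadStepB
    simp only [↓reduceIte] at hk ⊢
    by_cases hkk : k = k0
    · subst hkk
      rw [PySem.Dict.getD_modify_self, hgd, gb_inner_good, PySem.Dict.getD_modify_self]
    · obtain ⟨hdc, heq⟩ := hdk _ hkk hk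
      rw [heq, hv k hdc, PySem.Dict.getD_modify, if_neg hkk]

  | false =>
    unfold goodAndBadStepA at hk ⊢
    unfold goodAndBadStepB
    simp only [Bool.false_eq_true, ↓reduceIte] at hk ⊢
    by_cases hkk : k = k0
    · subst hkk
      rw [PySem.Dict.getD_modify_self, hgd, gb_inner_bad, PySem.Dict.getD_modify_self]
    · obtain ⟨hdc, heq⟩ := hdk _ hkk hk
      rw [heq, hv k hdc, PySem.Dict.getD_modify, if_neg hkk]


-- main invariant: from any related pair of states the two loops stay related
lemma gb_main (ms : List (String × String × Bool))
    (d : PySem.Dict String (PySem.Dict String (List String)))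
    (g b : PySem.Dict String (List String))
    (hnd : d.keys.Nodup)
    (hc : ∀ k, d.contains k = (g.contains k || b.contains k))
    (hv : ∀ k, d.contains k = true →
      d.getD k PySem.Dict.empty
        = PySem.Dict.mk [("good_boys", g.getD k []), ("bad_boys", b.getD k [])]) :
    (ms.foldl goodAndBadStepA d).items.map (fun p => (p.1, p.2.items))
      = (PySem.Set.update d.keys (ms.map (·.1))).map (fun k =>
          (k, [("good_boys", (ms.foldl goodAndBadStepB (g, b)).1.getD k []),
               ("bad_boys", (ms.foldl goodAndBadStepB (g, b)).2.getD k [])])) := by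
  induction ms generalizing d g b with
  | nil =>
    simp only [List.foldl_nil, List.map_nil, PySem.Set.update_nil]
    rw [PySem.Dict.items_eq_map_keys d hnd PySem.Dict.empty, List.map_map]
    apply List.map_congr_left
    intro k hk
    have hck : d.contains k = true := by
      rw [PySem.Dict.contains_eq_decide_mem_keys]; exact decide_eq_true hk
    simp [hv k hck]
  | cons m rest ih =>
    simp only [List.foldl_cons, List.map_cons, PySem.Set.update_cons]
    rw [← gb_stepA_keys d m]
    exact ih (goodAndBadStepA d m) (goodAndBadStepB (g, b) m).1 (goodAndBadStepB (g, b) m).2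
      (by rw [gb_stepA_keys]; exact PySem.Set.nodup_add _ _ hnd)
      (gb_stepA_contains d g b m hc)
      (gb_stepA_getD d g b m hc hv)

-- ===== VERDICT (by name: the statement is the Claim_ definition above) =====
theorem divide_good_and_bad_spec : Claim_equal_divide_good_and_bad := by
  intro messages _
  unfold Spec_divide_good_and_bad divide_good_and_bad divide_good_and_bad_alt
  have h := gb_main messages PySem.Dict.empty PySem.Dict.empty PySem.Dict.empty
    (by simp [PySem.Dict.keys_empty])
    (by intro k; simp [PySem.Dict.contains_empty])
    (by intro k hk; rw [PySem.Dict.contains_empty] at hk; exact absurd hk (by simp))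
  rw [h]
  simp [PySem.Dict.keys_empty, PySem.Set.update_nil_left, PySem.List.dedup]
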